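-- pv_equiv track=rewrite | github.com/yhs3434/Algorithms | baekjun/stage solve/19.math3/2004.py | solution
-- ===== SOURCE A (Python) =====
-- def solution(n, m):
--     cnt1 = 0
--     cnt11 = 0
--     cnt2 = 0
--     cnt22 = 0
--     cnt3 = 0
--     cnt33 = 0
--
--     i = 1
--     while 5**i <= n:
--         cnt1 += (n//(5**i))
--         i += 1
--     i = 1
--     while 5 ** i <= m:
--         cnt2 += (m // (5 ** i))
--         i += 1
--     i = 1
--     while 5 ** i <= (n-m):
--         cnt3 += ((n-m) // (5 ** i))
--         i += 1
--
--     i = 1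
--     while 2 ** i <= n:
--         cnt11 += (n // (2 ** i))
--         i += 1
--     i = 1
--     while 2 ** i <= m:
--         cnt22 += (m // (2 ** i))
--         i += 1
--     i = 1
--     while 2 ** i <= (n - m):
--         cnt33 += ((n - m) // (2 ** i))
--         i += 1
--
--     n2 = cnt11 - (cnt22+cnt33)
--     n5 = cnt1 - (cnt2+cnt3)
--     return min(n2, n5)
-- ===== SOURCE B (Python) =====
-- def solution(n, m):
--     def v(x, p):
--         # exponent of prime p in x! (Legendre, digit-sum form); 0 for x <= 0
--         if x <= 0:
--             return 0
--         s = 0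
--         y = x
--         while y > 0:
--             s += y % p
--             y //= p
--         return (x - s) // (p - 1)
--
--     n2 = v(n, 2) - v(m, 2) - v(n - m, 2)
--     n5 = v(n, 5) - v(m, 5) - v(n - m, 5)
--     return min(n2, n5)
-- ===== Notes on version B (the rewrite author's own statement) =====
-- stated objective: idiomatic
-- what changed: Replaces A's six floor-division-over-growing-powers loops with one Legendre helper v(x,p) that computes the prime exponent of p in x! via a single divmod digit-sum loop and the closed form (x - digitsum)//(p-1).
import Mathlib
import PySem

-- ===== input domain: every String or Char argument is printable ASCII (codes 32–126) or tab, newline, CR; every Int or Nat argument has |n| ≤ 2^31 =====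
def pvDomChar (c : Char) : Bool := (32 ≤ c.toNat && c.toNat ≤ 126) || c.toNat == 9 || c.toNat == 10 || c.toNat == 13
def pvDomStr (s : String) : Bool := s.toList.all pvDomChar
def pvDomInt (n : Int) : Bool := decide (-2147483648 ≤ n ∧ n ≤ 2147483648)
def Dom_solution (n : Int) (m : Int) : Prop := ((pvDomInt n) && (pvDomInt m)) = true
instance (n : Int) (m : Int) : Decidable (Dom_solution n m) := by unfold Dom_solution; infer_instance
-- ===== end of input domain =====

-- B replaces A's six floor-division-over-growing-powers loops with a single Legendre
-- digit-sum helper v(x,p) = (x - digitsum_p(x))/(p-1); objective: idiomatic.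

-- ===== PORT A =====
-- A's `while p**i <= x: cnt += x // p**i; i += 1` loop; `fuel` is only a
-- termination guard (fuel = x.toNat + 1 always exceeds the iteration count).
def loopA (fuel : Nat) (p : Int) (x : Int) (i : Nat) (acc : Int) : Int :=
  match fuel with
  | 0 => acc
  | fuel + 1 =>
    if p ^ i ≤ x then loopA fuel p x (i + 1) (acc + PySem.Int.floordiv x (p ^ i))
    else acc

def solution (n : Int) (m : Int) : Int :=
  let cnt1 := loopA (n.toNat + 1) 5 n 1 0
  let cnt2 := loopA (m.toNat + 1) 5 m 1 0
  let cnt3 := loopA ((n - m).toNat + 1) 5 (n - m) 1 0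
  let cnt11 := loopA (n.toNat + 1) 2 n 1 0
  let cnt22 := loopA (m.toNat + 1) 2 m 1 0
  let cnt33 := loopA ((n - m).toNat + 1) 2 (n - m) 1 0
  let n2 := cnt11 - (cnt22 + cnt33)
  let n5 := cnt1 - (cnt2 + cnt3)
  min n2 n5

-- ===== PORT B =====
-- B's `while y > 0: s += y % p; y //= p` digit-sum loop; `fuel` is only a
-- termination guard (y strictly decreases, so fuel = y.toNat suffices).
def dsumB (fuel : Nat) (p : Int) (y : Int) (s : Int) : Int :=
  match fuel with
  | 0 => s
  | fuel + 1 =>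
    if 0 < y then dsumB fuel p (PySem.Int.floordiv y p) (s + PySem.Int.mod y p)
    else s

def vB (x : Int) (p : Int) : Int :=
  if x ≤ 0 then 0
  else PySem.Int.floordiv (x - dsumB x.toNat p x 0) (p - 1)

def solution_alt (n : Int) (m : Int) : Int :=
  let n2 := vB n 2 - vB m 2 - vB (n - m) 2
  let n5 := vB n 5 - vB m 5 - vB (n - m) 5
  min n2 n5

-- ===== PRECONDITION & SPEC =====
def Spec_solution (n : Int) (m : Int) (out : Int) : Prop := out = solution_alt n m
instance (n : Int) (m : Int) (out : Int) : Decidable (Spec_solution n m out) := by unfold Spec_solution; infer_instance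

-- ===== CLAIM (what is proved, stated in full; the proofs are below) =====
def Claim_equal_solution : Prop := ∀ (n : Int) (m : Int), Dom_solution n m → Spec_solution n m (solution n m)

-- ===== LEMMAS AND PROOFS =====

-- Legendre's function: exponent of p in x! (the common value of both ports' loops).
def G (p : Nat) (x : Nat) : Nat :=
  if h : 2 ≤ p ∧ p ≤ x then x / p + G p (x / p) else 0
termination_by x
decreasing_by exact Nat.div_lt_self (by omega) (by omega)

theorem G_zero (p : Nat) : G p 0 = 0 := by
  rw [G]; split_ifs with h
  · omega
  · rfl

theorem loopA_eq (fuel p : Nat) (x : Int) (hp : 2 ≤ p) :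
    ∀ (i : Nat) (acc : Int), x.toNat / p ^ i ≤ fuel →
      loopA fuel (p : Int) x (i + 1) acc = acc + (G p (x.toNat / p ^ i) : Int) := by
  induction fuel with
  | zero =>
    intro i acc hz
    have hz0 : x.toNat / p ^ i = 0 := Nat.le_zero.mp hz
    have hcond : ¬ ((p : Int)) ^ (i+1) ≤ x := by
      intro hle
      have hx0 : 0 < x := lt_of_lt_of_le (by positivity) hle
      have hle' : p ^ (i+1) ≤ x.toNat := by
        have hxn : x = (x.toNat : Int) := by omega
        rw [hxn] at hle; exact_mod_cast hle
      have hdiv : p ≤ x.toNat / p ^ i := by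
        rw [Nat.le_div_iff_mul_le (by positivity)]
        calc p * p ^ i = p ^ (i+1) := by rw [pow_succ]; ring
        _ ≤ x.toNat := hle'
      rw [hz0] at hdiv
      omega
    simp [loopA, G_zero, hz0]
  | succ fuel ih =>
    intro i acc hz
    by_cases hcond : ((p : Int)) ^ (i+1) ≤ x
    · have hx0 : 0 < x := lt_of_lt_of_le (by positivity) hcond
      obtain ⟨a, rfl⟩ : ∃ a : ℕ, x = (a : Int) := ⟨x.toNat, by omega⟩
      simp only [Int.toNat_natCast] at hz ⊢
      have hle' : p ^ (i+1) ≤ a := by exact_mod_cast hcond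
      have hdiv : p ≤ a / p ^ i := by
        rw [Nat.le_div_iff_mul_le (by positivity)]
        calc p * p ^ i = p ^ (i+1) := by rw [pow_succ]; ring
        _ ≤ a := hle'
      have hsum : PySem.Int.floordiv (a : Int) ((p : Int) ^ (i+1))
          = ((a / p ^ (i+1) : Nat) : Int) := by
        rw [show ((p : Int)) ^ (i+1) = ((p ^ (i+1) : Nat) : Int) by push_cast; ring,
          PySem.Int.floordiv_natCast]
      have hstep : a / p ^ (i + 1) = a / p ^ i / p := by
        rw [Nat.div_div_eq_div_mul, ← pow_succ]
      have hfuel : a / p ^ (i + 1) ≤ fuel := by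
        rw [hstep]
        have : a / p ^ i / p < a / p ^ i := Nat.div_lt_self (by omega) (by omega)
        omega
      have hih := ih (i + 1) (acc + PySem.Int.floordiv (a : Int) ((p : Int) ^ (i+1))) hfuel
      simp only [Int.toNat_natCast] at hih
      have hG : G p (a / p ^ i) = a / p ^ i / p + G p (a / p ^ i / p) := by
        rw [G]; split_ifs with h
        · rfl
        · omega
      rw [loopA, if_pos hcond, hih, hsum, hstep, hG]
      push_cast; ring
    · have hdiv : ¬ p ≤ x.toNat / p ^ i := by
        intro hdiv
        have hle' : p ^ (i+1) ≤ x.toNat := by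
          have := (Nat.le_div_iff_mul_le (show 0 < p ^ i by positivity)).mp hdiv
          calc p ^ (i+1) = p * p ^ i := by rw [pow_succ]; ring
          _ ≤ x.toNat := this
        apply hcond
        have h1 : ((p ^ (i+1) : Nat) : Int) ≤ (x.toNat : Int) := by exact_mod_cast hle'
        have hpow : 1 ≤ p ^ (i+1) := Nat.one_le_pow _ _ (by omega)
        calc ((p : Int)) ^ (i+1) = ((p ^ (i+1) : Nat) : Int) := by push_cast; ring
        _ ≤ x := by omega
      have hG : G p (x.toNat / p ^ i) = 0 := by
        rw [G]; split_ifs with h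
        · omega
        · rfl
      simp [loopA, hcond, hG]

-- the digit-sum loop of B computes y - (p-1) * G p y
theorem dsumB_eq (fuel : Nat) (p : Nat) (hp : 2 ≤ p) :
    ∀ (y s : Int), 0 ≤ y → y.toNat ≤ fuel →
      dsumB fuel (p : Int) y s = s + y - ((p : Int) - 1) * (G p y.toNat : Int) := by
  induction fuel with
  | zero =>
    intro y s hy hf
    have : y = 0 := by omega
    simp [dsumB, this, G_zero]
  | succ fuel ih =>
    intro y s hy hf
    by_cases hy0 : 0 < y
    · obtain ⟨a, rfl⟩ : ∃ a : ℕ, y = (a : Int) := ⟨y.toNat, by omega⟩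
      simp only [Int.toNat_natCast] at hf ⊢
      have hq : PySem.Int.floordiv (a : Int) (p : Int) = ((a / p : Nat) : Int) :=
        PySem.Int.floordiv_natCast a p
      have hr : PySem.Int.mod (a : Int) (p : Int) = ((a % p : Nat) : Int) :=
        PySem.Int.mod_natCast a p
      have hlt : a / p < a := Nat.div_lt_self (by omega) (by omega)
      have hih := ih ((a / p : Nat) : Int) (s + ((a % p : Nat) : Int)) (by positivity) (by simp; omega)
      simp only [Int.toNat_natCast] at hih
      have hmodN : p * (a / p) + a % p = a := Nat.div_add_mod a p
      have hmod : (a : Int) = (p : Int) * ((a / p : Nat) : Int) + ((a % p : Nat) : Int) := by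
        exact_mod_cast hmodN.symm
      by_cases hle : p ≤ a
      · have hG : G p a = a / p + G p (a / p) := by
          rw [G]; split_ifs with h
          · rfl
          · omega
        rw [dsumB, if_pos hy0, hq, hr, hih, hG]
        simp only [Nat.cast_add]
        linear_combination -hmod
      · have hq0 : a / p = 0 := Nat.div_eq_of_lt (by omega)
        have hr0 : a % p = a := Nat.mod_eq_of_lt (by omega)
        have hG : G p a = 0 := by
          rw [G]; split_ifs with h
          · omega
          · rfl
        rw [dsumB, if_pos hy0, hq, hr, hih, hG, hq0, hr0, G_zero]
        push_cast; ring
    · have : y = 0 := by omega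
      simp [dsumB, this, G_zero]

-- B's v equals Legendre's G
theorem vB_eq (x : Int) (p : Nat) (hp : 2 ≤ p) : vB x (p : Int) = (G p x.toNat : Int) := by
  by_cases hx : x ≤ 0
  · have : x.toNat = 0 := by omega
    simp [vB, hx, this, G_zero]
  · rw [vB, if_neg hx, dsumB_eq x.toNat p hp x 0 (by omega) (le_refl _)]
    have h1 : x - (0 + x - ((p : Int) - 1) * (G p x.toNat : Int))
        = (G p x.toNat : Int) * ((p : Int) - 1) := by ring
    rw [h1, PySem.Int.floordiv_eq_ediv_of_pos (by exact_mod_cast (by omega : (1:Int) ≤ (p:Int) - 1)),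
      Int.mul_ediv_cancel _ (by exact_mod_cast (by omega : ((p:Int) - 1) ≠ 0))]

-- A's loop (with the fuel used in the port) equals Legendre's G
theorem loopA_full (p : Nat) (x : Int) (hp : 2 ≤ p) :
    loopA (x.toNat + 1) (p : Int) x 1 0 = (G p x.toNat : Int) := by
  have h := loopA_eq (x.toNat + 1) p x hp 0 0 (by simpa using Nat.div_le_self _ _)
  simpa using h

-- ===== VERDICT (by name: the statement is the Claim_ definition above) =====
theorem solution_spec : Claim_equal_solution := by
  intro n m _
  unfold Spec_solution solution solution_alt
  have c2 : (2 : Int) = ((2 : Nat) : Int) := by norm_num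
  have c5 : (5 : Int) = ((5 : Nat) : Int) := by norm_num
  rw [c2, c5,
      loopA_full 5 n (by norm_num), loopA_full 5 m (by norm_num),
      loopA_full 5 (n - m) (by norm_num),
      loopA_full 2 n (by norm_num), loopA_full 2 m (by norm_num),
      loopA_full 2 (n - m) (by norm_num),
      vB_eq n 2 (by norm_num), vB_eq m 2 (by norm_num), vB_eq (n - m) 2 (by norm_num),
      vB_eq n 5 (by norm_num), vB_eq m 5 (by norm_num), vB_eq (n - m) 5 (by norm_num)]
  simp only [sub_sub]
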